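-- pv_equiv track=rewrite | github.com/yang-bt03/Protein_Binding_Site_Prediction | class_files/Model_and_Pymol.py | generate_pymol_script
-- ===== SOURCE A (Python) =====
-- from itertools import groupby
--
-- def generate_pymol_script(
--     filtered: list,
--     pdb_path: str = None,
--     color: str = "red",
--     representation: str = "sticks",
-- ) -> str:
--
--     lines = []
--
--     if pdb_path:
--         lines.append(f"load {pdb_path}, protein")
--
--     chain_ids_present = sorted({c for c, _ in filtered})
--
--     for chain_id, group in groupby(sorted(filtered), key=lambda x: x[0]):
--         resi_str = "+".join(str(r) for _, r in group)
--         lines.append(f"select binding_{chain_id}, chain {chain_id} and resi {resi_str}")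
--         lines.append(f"show {representation}, binding_{chain_id}")
--         lines.append(f"show dots, binding_{chain_id}")
--         lines.append(f"color {color}, binding_{chain_id}")
--
--     all_selections = " or ".join(f"binding_{c}" for c in chain_ids_present)
--     lines.append(f"select binding_site, {all_selections}")
--     lines.append("zoom binding_site")
--
--     return "\n".join(lines)
-- ===== SOURCE B (Python) =====
-- def generate_pymol_script(
--     filtered: list,
--     pdb_path: str = None,
--     color: str = "red",
--     representation: str = "sticks",
-- ) -> str:
--     by_chain = {}
--     for c, r in filtered:
--         by_chain.setdefault(c, []).append(r)
--
--     chains = sorted(by_chain)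
--
--     lines = [f"load {pdb_path}, protein"] if pdb_path else []
--     lines += [
--         line
--         for c in chains
--         for resi_str in ["+".join(str(r) for r in sorted(by_chain[c]))]
--         for line in (
--             f"select binding_{c}, chain {c} and resi {resi_str}",
--             f"show {representation}, binding_{c}",
--             f"show dots, binding_{c}",
--             f"color {color}, binding_{c}",
--         )
--     ]
--     lines.append("select binding_site, " + " or ".join(f"binding_{c}" for c in chains))
--     lines.append("zoom binding_site")
--     return "\n".join(lines)
-- ===== Notes on version B (the rewrite author's own statement) =====
-- stated objective: alternative
-- what changed: Replaces the global lexicographic sort of all (chain, residue) pairs plus itertools.groupby with a dict index built in one pass (chain -> residue list, duplicates kept), then per-chain sorting of each residue list; chains come from the sorted dict keys instead of a separate set comprehension.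
import Mathlib
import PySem

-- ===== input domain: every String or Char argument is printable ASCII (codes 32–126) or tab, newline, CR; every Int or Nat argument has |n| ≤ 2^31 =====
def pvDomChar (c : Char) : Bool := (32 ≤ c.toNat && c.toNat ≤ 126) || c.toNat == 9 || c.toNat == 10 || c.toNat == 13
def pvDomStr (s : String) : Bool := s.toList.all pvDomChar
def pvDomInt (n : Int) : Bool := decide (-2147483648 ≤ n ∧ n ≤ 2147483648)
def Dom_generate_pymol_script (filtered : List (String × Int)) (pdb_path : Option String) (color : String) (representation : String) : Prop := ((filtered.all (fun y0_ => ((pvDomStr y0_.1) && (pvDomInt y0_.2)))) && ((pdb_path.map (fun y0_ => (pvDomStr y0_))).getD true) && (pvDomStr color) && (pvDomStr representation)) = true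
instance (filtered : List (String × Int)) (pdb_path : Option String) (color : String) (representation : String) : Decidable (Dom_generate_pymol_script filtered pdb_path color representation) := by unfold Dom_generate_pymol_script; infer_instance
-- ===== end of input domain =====

-- B replaces A's global lexicographic sort + itertools.groupby by a dict index (chain -> residue list)
-- built in one pass, with per-chain sorting; same output (objective: alternative, not faster).

-- ===== PORT A =====
-- helper: itertools.groupby over a list with key = first component (maximal runs of adjacent equal keys)
def pvGroupBy : List (String × Int) → List (String × List (String × Int))
  | [] => []
  | x :: xs =>
      (x.1, x :: xs.takeWhile (fun p => p.1 == x.1)) ::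
        pvGroupBy (xs.dropWhile (fun p => p.1 == x.1))
termination_by s => s.length
decreasing_by
  have h : (xs.dropWhile (fun p => p.1 == x.1)).length ≤ xs.length :=
    (List.dropWhile_sublist _).length_le
  simp only [List.length_cons]; omega

def generate_pymol_script (filtered : List (String × Int)) (pdb_path : Option String) (color : String) (representation : String) : String :=
  let lines0 : List String :=
    match pdb_path with
    | some p => if p ≠ "" then ["load " ++ p ++ ", protein"] else []
    | none => []
  let chain_ids_present :=
    PySem.List.sorted (PySem.Set.ofList (filtered.map Prod.fst)) (fun x => x) false
  let lines :=
    (pvGroupBy (PySem.List.sorted2 filtered Prod.fst Prod.snd false)).foldl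
      (fun acc g =>
        acc ++ ["select binding_" ++ g.1 ++ ", chain " ++ g.1 ++ " and resi " ++
                  PySem.Str.join "+" (g.2.map (fun p => PySem.Int.toStr p.2)),
                "show " ++ representation ++ ", binding_" ++ g.1,
                "show dots, binding_" ++ g.1,
                "color " ++ color ++ ", binding_" ++ g.1]) lines0
  let all_selections := PySem.Str.join " or " (chain_ids_present.map (fun c => "binding_" ++ c))
  PySem.Str.join "\n" (lines ++ ["select binding_site, " ++ all_selections, "zoom binding_site"])

-- ===== PORT B =====
-- one-pass dict index: chain -> list of its residues in input order (duplicates kept)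
def pvIndex (filtered : List (String × Int)) : PySem.Dict String (List Int) :=
  filtered.foldl (fun d p => d.insert p.1 (d.getD p.1 [] ++ [p.2])) PySem.Dict.empty

def generate_pymol_script_alt (filtered : List (String × Int)) (pdb_path : Option String) (color : String) (representation : String) : String :=
  let idx := pvIndex filtered
  let chains := PySem.List.sorted idx.keys (fun x => x) false
  let lines0 : List String :=
    match pdb_path with
    | some p => if p ≠ "" then ["load " ++ p ++ ", protein"] else []
    | none => []
  let lines := lines0 ++
    chains.flatMap (fun c =>
      ["select binding_" ++ c ++ ", chain " ++ c ++ " and resi " ++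
         PySem.Str.join "+"
           ((PySem.List.sorted (idx.getD c []) (fun x => x) false).map PySem.Int.toStr),
       "show " ++ representation ++ ", binding_" ++ c,
       "show dots, binding_" ++ c,
       "color " ++ color ++ ", binding_" ++ c])
  PySem.Str.join "\n" (lines ++
    ["select binding_site, " ++ PySem.Str.join " or " (chains.map (fun c => "binding_" ++ c)),
     "zoom binding_site"])

-- ===== PRECONDITION & SPEC =====
def Spec_generate_pymol_script (filtered : List (String × Int)) (pdb_path : Option String) (color : String) (representation : String) (out : String) : Prop := out = generate_pymol_script_alt filtered pdb_path color representation
instance (filtered : List (String × Int)) (pdb_path : Option String) (color : String) (representation : String) (out : String) : Decidable (Spec_generate_pymol_script filtered pdb_path color representation out) := by unfold Spec_generate_pymol_script; infer_instance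

-- ===== CLAIM (what is proved, stated in full; the proofs are below) =====
def Claim_equal_generate_pymol_script : Prop := ∀ (filtered : List (String × Int)) (pdb_path : Option String) (color : String) (representation : String), Dom_generate_pymol_script filtered pdb_path color representation → Spec_generate_pymol_script filtered pdb_path color representation (generate_pymol_script filtered pdb_path color representation)

-- ===== LEMMAS AND PROOFS =====

-- the (non-strict) lexicographic order that sorted(filtered) obeys
def pvLe (p q : String × Int) : Prop := p.1 < q.1 ∨ (p.1 = q.1 ∧ p.2 ≤ q.2)

-- the comparison PySem.List.sorted2 filtered Prod.fst Prod.snd false inserts with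
def pvBefore (a b : String × Int) : Bool :=
  decide (a.1 < b.1) || (!decide (b.1 < a.1) && decide (a.2 < b.2))

theorem pvLe_fst {p q : String × Int} (h : pvLe p q) : p.1 ≤ q.1 := by
  rcases h with h | ⟨h, _⟩
  · exact le_of_lt h
  · exact le_of_eq h

theorem pvBefore_true {a b : String × Int} (h : pvBefore a b = true) : pvLe a b := by
  simp only [pvBefore, Bool.or_eq_true, Bool.and_eq_true, Bool.not_eq_true',
    decide_eq_true_iff, decide_eq_false_iff_not] at h
  rcases h with h | ⟨h1, h2⟩
  · exact Or.inl h
  · rcases lt_trichotomy a.1 b.1 with hl | he | hg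
    · exact Or.inl hl
    · exact Or.inr ⟨he, le_of_lt h2⟩
    · exact absurd hg h1

theorem pvBefore_false {a b : String × Int} (h : pvBefore a b = false) : pvLe b a := by
  simp only [pvBefore, Bool.or_eq_false_iff, Bool.and_eq_false_iff, Bool.not_eq_false',
    decide_eq_true_iff, decide_eq_false_iff_not] at h
  rcases h with ⟨h1, h2 | h3⟩
  · exact Or.inl h2
  · rcases lt_trichotomy b.1 a.1 with hl | he | hg
    · exact Or.inl hl
    · exact Or.inr ⟨he, not_lt.mp h3⟩
    · exact absurd hg h1

theorem pvLe_trans {a b c : String × Int} (h1 : pvLe a b) (h2 : pvLe b c) : pvLe a c := by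
  rcases h1 with h1 | ⟨h1, h1'⟩ <;> rcases h2 with h2 | ⟨h2, h2'⟩
  · exact Or.inl (lt_trans h1 h2)
  · exact Or.inl (h2 ▸ h1)
  · exact Or.inl (h1 ▸ h2)
  · exact Or.inr ⟨h1.trans h2, le_trans h1' h2'⟩

theorem pvInsertBy_pairwise (x : String × Int) (acc : List (String × Int))
    (h : acc.Pairwise pvLe) : (PySem.List.insertBy pvBefore x acc).Pairwise pvLe := by
  induction acc with
  | nil => simp [PySem.List.insertBy]
  | cons y ys ih =>
    rw [List.pairwise_cons] at h
    by_cases hb : pvBefore x y = true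
    · simp only [PySem.List.insertBy, hb, if_true]
      refine List.Pairwise.cons ?_ (List.Pairwise.cons h.1 h.2)
      intro z hz
      rcases List.mem_cons.mp hz with rfl | hz
      · exact pvBefore_true hb
      · exact pvLe_trans (pvBefore_true hb) (h.1 z hz)
    · simp only [PySem.List.insertBy, hb]
      refine List.Pairwise.cons ?_ (ih h.2)
      intro z hz
      rcases (PySem.List.mem_insertBy _ _ _ _).mp hz with rfl | hz
      · exact pvBefore_false (Bool.eq_false_iff.mpr hb)
      · exact h.1 z hz

theorem pvSorted2_pairwise (xs : List (String × Int)) :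
    (PySem.List.sorted2 xs Prod.fst Prod.snd false).Pairwise pvLe := by
  have haux : ∀ (l acc : List (String × Int)), acc.Pairwise pvLe →
      (l.foldl (fun acc x => PySem.List.insertBy pvBefore x acc) acc).Pairwise pvLe := by
    intro l
    induction l with
    | nil => intro acc h; simpa using h
    | cons a l ih =>
      intro acc h
      exact ih _ (pvInsertBy_pairwise a acc h)
  exact haux xs [] List.Pairwise.nil

-- pvIndex's value at a chain is exactly that chain's residues in input order
theorem pvIndex_getD (filtered : List (String × Int)) (c : String) :
    (pvIndex filtered).getD c [] = (filtered.filter (fun p => p.1 == c)).map Prod.snd := by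
  have haux : ∀ (l : List (String × Int)) (d : PySem.Dict String (List Int)),
      (l.foldl (fun d p => d.insert p.1 (d.getD p.1 [] ++ [p.2])) d).getD c []
        = d.getD c [] ++ (l.filter (fun p => p.1 == c)).map Prod.snd := by
    intro l
    induction l with
    | nil => intro d; simp
    | cons p l ih =>
      intro d
      rw [List.foldl_cons, ih]
      by_cases hc : p.1 = c
      · simp [hc]
      · simp [hc, PySem.Dict.getD_insert, Ne.symm hc]
  have h0 : (PySem.Dict.empty : PySem.Dict String (List Int)).getD c [] = [] := rfl
  simpa [pvIndex, h0] using haux filtered PySem.Dict.empty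

theorem pvIndex_keys (filtered : List (String × Int)) :
    (pvIndex filtered).keys = PySem.Set.ofList (filtered.map Prod.fst) := by
  have h := PySem.Dict.keys_foldl_insert_key filtered Prod.fst
    (fun d p => d.getD p.1 [] ++ [p.2]) PySem.Dict.empty
  simp only [pvIndex]
  simpa [PySem.Set.update, PySem.Set.ofList_eq_foldl, PySem.Dict.empty, PySem.Dict.keys] using h

theorem pvDropWhile_head {α : Type} (pr : α → Bool) :
    ∀ (l : List α) (y : α) (ys : List α), l.dropWhile pr = y :: ys → pr y = false := by
  intro l
  induction l with
  | nil => intro y ys h; simp at h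
  | cons a l ih =>
    intro y ys h
    rw [List.dropWhile_cons] at h
    by_cases ha : pr a = true
    · exact ih y ys (by simpa [ha] using h)
    · simp only [ha] at h
      cases h
      exact Bool.eq_false_iff.mpr ha

-- main grouping lemma: groupby over a lex-sorted list, enumerated by any strictly
-- increasing list of exactly its chains, is per-chain filtering
theorem pvGroupBy_eq (cs : List String) :
    ∀ (s : List (String × Int)), s.Pairwise pvLe →
    cs.Pairwise (· < ·) → (∀ c, c ∈ cs ↔ c ∈ s.map Prod.fst) →
    pvGroupBy s = cs.map (fun c => (c, s.filter (fun p => p.1 == c))) := by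
  induction cs with
  | nil =>
    intro s _ _ hmem
    cases s with
    | nil => simp [pvGroupBy]
    | cons x xs =>
      exact absurd ((hmem x.1).mpr (by simp)) (by simp)
  | cons c0 cs' ih =>
    intro s hs hcs hmem
    cases s with
    | nil => exact absurd ((hmem c0).mp (by simp)) (by simp)
    | cons x xs =>
      rw [List.pairwise_cons] at hs hcs
      -- head of cs is the head chain
      have hxmin : ∀ p ∈ x :: xs, x.1 ≤ p.1 := by
        intro p hp
        rcases List.mem_cons.mp hp with rfl | hp
        · exact le_refl _
        · exact pvLe_fst (hs.1 p hp)
      have hc0 : c0 = x.1 := by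
        obtain ⟨p, hp, hpc⟩ := List.mem_map.mp ((hmem c0).mp (by simp))
        have h1 : x.1 ≤ c0 := hpc ▸ hxmin p hp
        have h2 : x.1 ∈ c0 :: cs' := (hmem x.1).mpr (by simp)
        rcases List.mem_cons.mp h2 with h2 | h2
        · exact h2.symm
        · exact absurd (lt_of_lt_of_le (hcs.1 _ h2) h1) (lt_irrefl c0)
      subst hc0
      set g := xs.takeWhile (fun p => p.1 == x.1) with hg
      set rest := xs.dropWhile (fun p => p.1 == x.1) with hrest
      have hsplit : xs = g ++ rest := (List.takeWhile_append_dropWhile).symm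
      have hgkey : ∀ p ∈ g, p.1 = x.1 := by
        intro p hp
        rw [hg] at hp
        have h := List.mem_takeWhile_imp hp
        simpa using h
      have hrestlt : ∀ p ∈ rest, x.1 < p.1 := by
        cases hr : rest with
        | nil => intro p hp; simp at hp
        | cons r rs =>
          have hrne : r.1 ≠ x.1 := by
            have := pvDropWhile_head _ xs r rs (hrest ▸ hr)
            simpa using this
          have hr' : r ∈ rest := by rw [hr]; simp
          have hrmem : r ∈ xs := (List.dropWhile_sublist _).subset (hrest ▸ hr')
          have hxr : x.1 < r.1 :=
            lt_of_le_of_ne (hxmin r (List.mem_cons_of_mem x hrmem)) (Ne.symm hrne)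
          have hpw : (r :: rs).Pairwise pvLe := by
            rw [← hr, hrest]
            exact hs.2.sublist (List.dropWhile_sublist _)
          rw [List.pairwise_cons] at hpw
          intro p hp
          rcases List.mem_cons.mp hp with rfl | hp
          · exact hxr
          · exact lt_of_lt_of_le hxr (pvLe_fst (hpw.1 p hp))
      have hfilter_head : (x :: xs).filter (fun p => p.1 == x.1) = x :: g := by
        rw [hsplit, List.filter_cons, List.filter_append]
        have h1 : g.filter (fun p => p.1 == x.1) = g :=
          List.filter_eq_self.mpr (fun p hp => beq_iff_eq.mpr (hgkey p hp))
        have h2 : rest.filter (fun p => p.1 == x.1) = [] :=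
          List.filter_eq_nil_iff.mpr (fun p hp => by
            simpa using (ne_of_gt (hrestlt p hp)))
        simp [h1, h2]
      have hfilter_rest : ∀ c ∈ cs', (x :: xs).filter (fun p => p.1 == c)
          = rest.filter (fun p => p.1 == c) := by
        intro c hc
        have hxc : x.1 < c := hcs.1 c hc
        rw [hsplit, List.filter_cons, List.filter_append]
        have h1 : g.filter (fun p => p.1 == c) = [] :=
          List.filter_eq_nil_iff.mpr (fun p hp => by
            simp [hgkey p hp, ne_of_lt hxc])
        simp [h1, ne_of_lt hxc]
      have hmem' : ∀ c, c ∈ cs' ↔ c ∈ rest.map Prod.fst := by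
        intro c
        constructor
        · intro hc
          have hxc : x.1 < c := hcs.1 c hc
          obtain ⟨p, hp, hpc⟩ := List.mem_map.mp ((hmem c).mp (by simp [hc]))
          rcases List.mem_cons.mp hp with rfl | hp
          · exact absurd hpc (ne_of_lt hxc)
          · rw [hsplit] at hp
            rcases List.mem_append.mp hp with hp | hp
            · exact absurd (hpc ▸ hgkey p hp) (Ne.symm (ne_of_lt hxc))
            · exact List.mem_map.mpr ⟨p, hp, hpc⟩
        · intro hc
          obtain ⟨p, hp, hpc⟩ := List.mem_map.mp hc
          have hxc : x.1 < c := hpc ▸ hrestlt p hp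
          have hpmem : p ∈ x :: xs := by
            rw [hsplit]; exact List.mem_cons.mpr (Or.inr (List.mem_append.mpr (Or.inr hp)))
          have : c ∈ x.1 :: cs' := (hmem c).mpr (List.mem_map.mpr ⟨p, hpmem, hpc⟩)
          rcases List.mem_cons.mp this with rfl | h
          · exact absurd hxc (lt_irrefl _)
          · exact h
      have hrest_pw : rest.Pairwise pvLe := by
        rw [hrest]; exact hs.2.sublist (List.dropWhile_sublist _)
      have hrec := ih rest hrest_pw hcs.2 hmem'
      rw [List.map_cons, pvGroupBy, ← hg, ← hrest]
      congr 1
      · rw [hfilter_head]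
      · rw [hrec]
        exact (List.map_congr_left (fun c hc => by rw [hfilter_rest c hc])).symm

-- B's per-chain sorted residue list equals A's run of residues in the globally sorted list
theorem pvChainResidues (filtered : List (String × Int)) (c : String) :
    PySem.List.sorted ((pvIndex filtered).getD c []) (fun x => x) false
      = ((PySem.List.sorted2 filtered Prod.fst Prod.snd false).filter
          (fun p => p.1 == c)).map Prod.snd := by
  rw [pvIndex_getD]
  apply PySem.List.sorted_id_eq_of_perm_of_pairwise
  · exact ((PySem.List.sorted2_perm filtered Prod.fst Prod.snd false).filter _).map _
  · have h1 : ((PySem.List.sorted2 filtered Prod.fst Prod.snd false).filter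
        (fun p => p.1 == c)).Pairwise (fun p q => pvLe p q ∧ p.1 = c ∧ q.1 = c) := by
      have hpw := (pvSorted2_pairwise filtered).filter (fun p => p.1 == c)
      refine hpw.imp_of_mem ?_
      intro p q hp hq h
      exact ⟨h, beq_iff_eq.mp (List.mem_filter.mp hp).2, beq_iff_eq.mp (List.mem_filter.mp hq).2⟩
    rw [List.pairwise_map]
    refine h1.imp ?_
    rintro p q ⟨hle, hp, hq⟩
    rcases hle with hlt | ⟨_, hle⟩
    · rw [hp, hq] at hlt
      exact absurd hlt (lt_irrefl c)
    · exact hle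

theorem pvChains_mem (filtered : List (String × Int)) (c : String) :
    c ∈ PySem.List.sorted (PySem.Set.ofList (filtered.map Prod.fst)) (fun x => x) false
      ↔ c ∈ (PySem.List.sorted2 filtered Prod.fst Prod.snd false).map Prod.fst := by
  rw [PySem.List.mem_sorted, PySem.Set.mem_ofList]
  exact (List.Perm.mem_iff
    ((PySem.List.sorted2_perm filtered Prod.fst Prod.snd false).map Prod.fst)).symm

-- ===== VERDICT (by name: the statement is the Claim_ definition above) =====
theorem generate_pymol_script_spec : Claim_equal_generate_pymol_script := by
  intro filtered pdb_path color representation _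
  unfold Spec_generate_pymol_script
  simp only [generate_pymol_script, generate_pymol_script_alt]
  rw [PySem.List.foldl_append_eq_flatMap, pvIndex_keys]
  have hgb := pvGroupBy_eq
    (PySem.List.sorted (PySem.Set.ofList (filtered.map Prod.fst)) (fun x => x) false)
    (PySem.List.sorted2 filtered Prod.fst Prod.snd false)
    (pvSorted2_pairwise filtered)
    (PySem.List.sorted_ofList_pairwise_lt (filtered.map Prod.fst))
    (fun c => pvChains_mem filtered c)
  rw [hgb]
  have hflat : ∀ cs' : List String,
      List.flatMap (fun g : String × List (String × Int) =>
          ["select binding_" ++ g.1 ++ ", chain " ++ g.1 ++ " and resi " ++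
              PySem.Str.join "+" (g.2.map (fun p => PySem.Int.toStr p.2)),
            "show " ++ representation ++ ", binding_" ++ g.1,
            "show dots, binding_" ++ g.1,
            "color " ++ color ++ ", binding_" ++ g.1])
        (cs'.map (fun c => (c, (PySem.List.sorted2 filtered Prod.fst Prod.snd false).filter
            (fun p => p.1 == c))))
      = List.flatMap (fun c =>
          ["select binding_" ++ c ++ ", chain " ++ c ++ " and resi " ++
              PySem.Str.join "+"
                ((PySem.List.sorted ((pvIndex filtered).getD c []) (fun x => x) false).map
                  PySem.Int.toStr),
            "show " ++ representation ++ ", binding_" ++ c,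
            "show dots, binding_" ++ c,
            "color " ++ color ++ ", binding_" ++ c]) cs' := by
    intro cs'
    induction cs' with
    | nil => rfl
    | cons c t iht =>
      simp only [List.map_cons, List.flatMap_cons, iht]
      congr 1
      rw [pvChainResidues filtered c]
      simp only [List.map_map, Function.comp_def]
  rw [hflat]
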